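-- pv_equiv track=rewrite | github.com/segorucu/Leetcode | 1085 Sum of Digits in the Minimum Number/1085sum-of-digits-in-the-minimum-number.py | sumOfDigits
-- ===== SOURCE A (Python) =====
-- from typing import List
--
-- def sumOfDigits(nums: List[int]) -> int:
--     val = min(nums)
--     sm = 0
--     while val > 0:
--         sm += val % 10
--         val = val // 10
--     if sm % 2 == 0:
--         return 1
--     else:
--         return 0
-- ===== SOURCE B (Python) =====
-- def sumOfDigits(nums):
--     m = min(nums)
--     sm = sum(int(c) for c in str(m)) if m > 0 else 0
--     return 1 - sm % 2
-- ===== Notes on version B (the rewrite author's own statement) =====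
-- stated objective: idiomatic
-- what changed: B replaces A's arithmetic digit-peeling while-loop and if/else parity branch with a sum over the decimal string of the minimum and the arithmetic expression 1 - sm % 2.
-- outside the precondition, e.g. on sumOfDigits([]): A raises ValueError, B raises ValueError
import Mathlib
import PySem

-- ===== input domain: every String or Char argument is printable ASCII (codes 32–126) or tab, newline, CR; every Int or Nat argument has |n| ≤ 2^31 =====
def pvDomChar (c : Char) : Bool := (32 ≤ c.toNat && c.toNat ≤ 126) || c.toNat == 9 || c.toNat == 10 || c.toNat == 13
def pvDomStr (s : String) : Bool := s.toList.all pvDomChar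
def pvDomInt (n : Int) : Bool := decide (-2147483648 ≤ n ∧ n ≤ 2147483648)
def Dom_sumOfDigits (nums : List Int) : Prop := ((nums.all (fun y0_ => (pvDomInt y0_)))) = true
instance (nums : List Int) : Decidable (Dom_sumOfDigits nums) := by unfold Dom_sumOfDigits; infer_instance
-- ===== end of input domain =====

-- B changes the representation: string digit sum of the minimum plus 1 - sm % 2, instead of A's
-- arithmetic digit-peeling while-loop and if/else on parity (same behaviour, idiomatic rewrite).

-- ===== PORT A =====
-- the while-loop of A: peel decimal digits arithmetically
def sumOfDigitsLoopA (val sm : Int) : Int :=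
  if _h : val > 0 then
    sumOfDigitsLoopA (PySem.Int.floordiv val 10) (sm + PySem.Int.mod val 10)
  else sm
termination_by val.toNat
decreasing_by
  have hfd : PySem.Int.floordiv val 10 = val / 10 :=
    PySem.Int.floordiv_eq_ediv_of_pos (by omega)
  rw [hfd]; omega

def sumOfDigits (nums : List Int) : Int :=
  match PySem.List.min? nums (fun x => x) with
  | none => 0   -- min([]) raises ValueError; excluded by Pre_
  | some val =>
    let sm := sumOfDigitsLoopA val 0
    if PySem.Int.mod sm 2 = 0 then 1 else 0

-- ===== PORT B =====
-- int(c) for a single character c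
def sumOfDigitsCharVal (c : Char) : Int := (PySem.Int.ofChars? [c]).getD 0

def sumOfDigits_alt (nums : List Int) : Int :=
  match PySem.List.min? nums (fun x => x) with
  | none => 0   -- min([]) raises ValueError; excluded by Pre_
  | some m =>
    let sm : Int :=
      if m > 0 then
        (PySem.Int.toStr m).toList.foldl (fun acc c => acc + sumOfDigitsCharVal c) 0
      else 0
    1 - PySem.Int.mod sm 2

-- ===== PRECONDITION & SPEC =====
-- Pre_ excludes only the empty list, on which Python's min raises ValueError in both A and B.
def Pre_sumOfDigits (nums : List Int) : Prop := nums ≠ []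
instance (nums : List Int) : Decidable (Pre_sumOfDigits nums) := by unfold Pre_sumOfDigits; infer_instance
def pvWitness_sumOfDigits : List Int := [12, 3, -4]

def Spec_sumOfDigits (nums : List Int) (out : Int) : Prop := out = sumOfDigits_alt nums
instance (nums : List Int) (out : Int) : Decidable (Spec_sumOfDigits nums out) := by unfold Spec_sumOfDigits; infer_instance

-- ===== CLAIM (what is proved, stated in full; the proofs are below) =====
def Claim_equal_sumOfDigits : Prop := ∀ (nums : List Int), Dom_sumOfDigits nums → Pre_sumOfDigits nums → Spec_sumOfDigits nums (sumOfDigits nums)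

-- ===== LEMMAS AND PROOFS =====

-- digit sum of a natural number, the value both programs compute
def natDigitSum (n : Nat) : Nat :=
  if h : n = 0 then 0 else n % 10 + natDigitSum (n / 10)
decreasing_by exact Nat.div_lt_self (Nat.pos_of_ne_zero h) (by norm_num)

def sumVals (l : List Char) : Int := (l.map sumOfDigitsCharVal).sum

theorem charVal_digitChar (d : Nat) (h : d < 10) :
    sumOfDigitsCharVal (Nat.digitChar d) = (d : Int) := by
  interval_cases d <;> decide

theorem toDigitsCore_sum (f : Nat) : ∀ (n : Nat) (acc : List Char), n < f →
    sumVals (Nat.toDigitsCore 10 f n acc) = ((n % 10 : Nat) : Int) + (natDigitSum (n / 10) : Int) + sumVals acc := by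
  induction f with
  | zero => intro n acc h; omega
  | succ f ih =>
    intro n acc h
    simp only [Nat.toDigitsCore]
    by_cases h0 : n / 10 = 0
    · simp only [h0, if_true]
      rw [show natDigitSum 0 = 0 from by unfold natDigitSum; simp]
      simp [sumVals, charVal_digitChar (n % 10) (Nat.mod_lt n (by norm_num))]
    · rw [if_neg h0]
      have hlt : n / 10 < f := by
        have h1 : n / 10 < n := Nat.div_lt_self (by omega) (by norm_num)
        omega
      rw [ih (n / 10) _ hlt]
      have : natDigitSum (n / 10) = n / 10 % 10 + natDigitSum (n / 10 / 10) := by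
        rw [natDigitSum]; simp [h0]
      rw [this]
      simp [sumVals, charVal_digitChar (n % 10) (Nat.mod_lt n (by omega))]
      ring

theorem toDigits_sum (n : Nat) : sumVals (Nat.toDigits 10 n) = (natDigitSum n : Int) := by
  unfold Nat.toDigits
  rw [toDigitsCore_sum (n + 1) n [] (by omega)]
  by_cases h0 : n = 0
  · subst h0
    rw [show natDigitSum 0 = 0 from by rw [natDigitSum]; simp]
    simp [sumVals]
  · rw [show natDigitSum n = n % 10 + natDigitSum (n / 10) from by rw [natDigitSum]; simp [h0]]
    simp [sumVals]

theorem loopA_eq (n : Nat) : ∀ sm : Int, sumOfDigitsLoopA (n : Int) sm = sm + (natDigitSum n : Int) := by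
  induction n using Nat.strong_induction_on with
  | _ n ih =>
    intro sm
    rw [sumOfDigitsLoopA]
    by_cases hp : (n : Int) > 0
    · rw [dif_pos hp]
      have hn : 0 < n := by exact_mod_cast hp
      rw [show PySem.Int.floordiv (n : Int) 10 = ((n / 10 : Nat) : Int) from by
            exact_mod_cast PySem.Int.floordiv_natCast n 10,
          show PySem.Int.mod (n : Int) 10 = ((n % 10 : Nat) : Int) from by
            exact_mod_cast PySem.Int.mod_natCast n 10]
      rw [ih (n / 10) (Nat.div_lt_self hn (by norm_num))]
      rw [show natDigitSum n = n % 10 + natDigitSum (n / 10) from by rw [natDigitSum]; simp [show n ≠ 0 from by omega]]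
      push_cast; ring
    · rw [dif_neg hp]
      have : n = 0 := by omega
      subst this
      rw [show natDigitSum 0 = 0 from by rw [natDigitSum]; simp]
      simp

theorem parity_eq (s : Nat) :
    (if PySem.Int.mod (s : Int) 2 = 0 then (1 : Int) else 0) = 1 - PySem.Int.mod (s : Int) 2 := by
  rw [show PySem.Int.mod (s : Int) 2 = ((s % 2 : Nat) : Int) from by exact_mod_cast PySem.Int.mod_natCast s 2]
  rcases Nat.mod_two_eq_zero_or_one s with h | h <;> rw [h] <;> norm_num

theorem core_eq (m : Int) :
    (if PySem.Int.mod (sumOfDigitsLoopA m 0) 2 = 0 then (1 : Int) else 0) =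
      1 - PySem.Int.mod (if m > 0 then
        (PySem.Int.toStr m).toList.foldl (fun acc c => acc + sumOfDigitsCharVal c) 0
      else 0) 2 := by
  by_cases hp : m > 0
  · rw [if_pos hp]
    have hm : m = (m.toNat : Int) := by omega
    rw [PySem.Int.toList_toStr]
    rw [show PySem.Int.toChars m = Nat.toDigits 10 m.toNat from by
          unfold PySem.Int.toChars; rw [if_neg (by omega)]]
    rw [PySem.List.foldl_add _ sumOfDigitsCharVal 0]
    have hsum : (0 : Int) + ((Nat.toDigits 10 m.toNat).map sumOfDigitsCharVal).sum = (natDigitSum m.toNat : Int) := by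
      rw [zero_add]; exact toDigits_sum m.toNat
    rw [hsum]
    rw [hm, loopA_eq m.toNat 0, zero_add]
    exact parity_eq (natDigitSum m.toNat)
  · rw [if_neg hp]
    rw [sumOfDigitsLoopA, dif_neg hp]
    decide

-- ===== VERDICT (by name: the statement is the Claim_ definition above) =====
theorem sumOfDigits_spec : Claim_equal_sumOfDigits := by
  intro nums _ hpre
  unfold Spec_sumOfDigits sumOfDigits sumOfDigits_alt
  cases hmin : PySem.List.min? nums (fun x => x) with
  | none => rfl
  | some m => exact core_eq m
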